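-- pv_equiv track=rewrite | github.com/ZayanMA/Part3_Auto_Doc | autodoc-backend/src/autodoc/context.py | score_doc_sections
-- ===== SOURCE A (Python) =====
-- def score_doc_sections(
--     existing_doc: str,
--     symbols: list[str],
-- ) -> list[tuple[str, str]]:
--     """
--     Split existing_doc into H2 sections and score each against changed symbols.
--     Mirrors claw-code's _score(): count how many symbol tokens appear in each section.
--     Returns sections sorted by relevance (desc). Overview is always surfaced first.
--     """
--     if not existing_doc or not symbols:
--         return []
--
--     sections: list[tuple[str, str]] = []
--     current_heading = ""
--     current_lines: list[str] = []
--
--     for line in existing_doc.splitlines():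
--         if line.startswith("## "):
--             if current_heading:
--                 sections.append((current_heading, "\n".join(current_lines).strip()))
--             current_heading = line.lstrip("# ").strip()
--             current_lines = []
--         else:
--             current_lines.append(line)
--     if current_heading:
--         sections.append((current_heading, "\n".join(current_lines).strip()))
--
--     symbol_tokens = {s.lower() for s in symbols}
--
--     def _section_score(heading: str, body: str) -> int:
--         haystack = (heading + " " + body).lower()
--         return sum(1 for tok in symbol_tokens if tok in haystack)
--
--     scored = sorted(sections, key=lambda s: _section_score(s[0], s[1]), reverse=True)
--     overview = [(h, b) for h, b in scored if h.lower() == "overview"]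
--     rest = [(h, b) for h, b in scored if h.lower() != "overview"]
--     return overview + rest
-- ===== SOURCE B (Python) =====
-- def score_doc_sections(
--     existing_doc: str,
--     symbols: list[str],
-- ) -> list[tuple[str, str]]:
--     if not existing_doc or not symbols:
--         return []
--
--     lines = existing_doc.splitlines()
--
--     # Parse back-to-front: walking the lines in reverse, the body of a section is
--     # exactly what has accumulated since the previous (later) heading line.
--     sections: list[tuple[str, str]] = []
--     body: list[str] = []  # body lines of the current section, in reverse order
--     for line in reversed(lines):
--         if line.startswith("## "):
--             heading = line.lstrip("# ").strip()
--             if heading: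
--                 sections.append((heading, "\n".join(reversed(body)).strip()))
--             body = []
--         else:
--             body.append(line)
--     sections.reverse()
--
--     tokens = {s.lower() for s in symbols}
--
--     def _score(heading: str, body: str) -> int:
--         haystack = (heading + " " + body).lower()
--         return len([tok for tok in tokens if tok in haystack])
--
--     # One stable sort with a composite key replaces sort-desc + two filter passes:
--     # overview sections (key False) come first, then descending score.
--     return sorted(sections, key=lambda s: (s[0].lower() != "overview", -_score(s[0], s[1])))
-- ===== Notes on version B (the rewrite author's own statement) =====
-- stated objective: alternative
-- what changed: B parses sections back-to-front (body lines accumulate until the previous heading is met, no current_heading/flush state machine) and returns a SINGLE stable sort on the composite key (section is not 'overview', -score) instead of A's descending sort followed by two filter passes; the score is the length of the filtered token list instead of a 0/1 generator sum.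
import Mathlib
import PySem

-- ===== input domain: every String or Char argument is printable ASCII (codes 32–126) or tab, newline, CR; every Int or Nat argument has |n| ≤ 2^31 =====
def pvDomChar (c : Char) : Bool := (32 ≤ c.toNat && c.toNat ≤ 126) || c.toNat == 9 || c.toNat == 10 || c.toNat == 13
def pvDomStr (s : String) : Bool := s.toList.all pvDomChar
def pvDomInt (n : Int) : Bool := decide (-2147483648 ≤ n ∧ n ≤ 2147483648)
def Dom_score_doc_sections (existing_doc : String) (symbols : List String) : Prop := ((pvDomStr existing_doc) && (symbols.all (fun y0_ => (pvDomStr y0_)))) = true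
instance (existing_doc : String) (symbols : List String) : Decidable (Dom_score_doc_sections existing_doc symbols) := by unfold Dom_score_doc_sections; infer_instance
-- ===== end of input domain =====

-- B re-implements A with a back-to-front section parser and ONE stable sort on a
-- composite key (not-overview, -score) instead of sort-desc + two filter passes;
-- same return value, similar cost (objective: alternative).

-- hand port of s.lstrip("# "): drop leading '#'/' ' chars; exact (lstrip removes
-- every leading char that is in the argument set)
def pvLstripHashSpace (s : String) : String :=
  String.ofList (s.toList.dropWhile (fun c => c == '#' || c == ' '))

-- ===== PORT A =====
-- A's twice-inlined "if current_heading: sections.append(...)" flush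
def pvFlush (secs : List (String × String)) (h : String) (buf : List String) :
    List (String × String) :=
  if h == "" then secs else secs ++ [(h, PySem.Str.strip (PySem.Str.join "\n" buf))]

-- A's loop body over (sections, current_heading, current_lines)
def pvStepA (st : List (String × String) × String × List String) (line : String) :
    List (String × String) × String × List String :=
  if PySem.Str.startswith line "## " then
    (pvFlush st.1 st.2.1 st.2.2, PySem.Str.strip (pvLstripHashSpace line), ([] : List String))
  else (st.1, st.2.1, st.2.2 ++ [line])

def score_doc_sections (existing_doc : String) (symbols : List String) : List (String × String) :=
  if existing_doc == "" || symbols == [] then []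
  else
    let st := (PySem.Str.splitlines existing_doc).foldl pvStepA ([], "", [])
    let sections := pvFlush st.1 st.2.1 st.2.2
    let symbol_tokens : PySem.Set String := PySem.Set.ofList (symbols.map (fun s => PySem.Str.lower s))
    let sectionScore := fun (heading body : String) =>
      let haystack := PySem.Str.lower (PySem.Str.join " " [heading, body])
      (List.map (fun tok => if PySem.Str.isIn tok haystack then (1 : Int) else 0) symbol_tokens).sum
    let scored := PySem.List.sorted sections (fun s => sectionScore s.1 s.2) true
    let overview := scored.filter (fun s => PySem.Str.lower s.1 == "overview")
    let rest := scored.filter (fun s => !(PySem.Str.lower s.1 == "overview"))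
    overview ++ rest

-- ===== PORT B =====
-- B's loop body over (sections-reversed, body-lines-reversed), fed the lines in reverse
def pvStepB (st : List (String × String) × List String) (line : String) :
    List (String × String) × List String :=
  if PySem.Str.startswith line "## " then
    let heading := PySem.Str.strip (pvLstripHashSpace line)
    (if heading == "" then st.1
     else st.1 ++ [(heading, PySem.Str.strip (PySem.Str.join "\n" st.2.reverse))],
     ([] : List String))
  else (st.1, st.2 ++ [line])

def score_doc_sections_alt (existing_doc : String) (symbols : List String) : List (String × String) :=
  if existing_doc == "" || symbols == [] then []
  else
    let lines := PySem.Str.splitlines existing_doc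
    let st := lines.reverse.foldl pvStepB ([], [])
    let sections := st.1.reverse
    let tokens : PySem.Set String := PySem.Set.ofList (symbols.map (fun s => PySem.Str.lower s))
    let score := fun (heading body : String) =>
      let haystack := PySem.Str.lower (PySem.Str.join " " [heading, body])
      ((List.filter (fun tok => PySem.Str.isIn tok haystack) tokens).length : Int)
    PySem.List.sorted2 sections
      (fun s => PySem.Str.lower s.1 != "overview")
      (fun s => -(score s.1 s.2))

-- ===== PRECONDITION & SPEC =====
def Spec_score_doc_sections (existing_doc : String) (symbols : List String) (out : List (String × String)) : Prop := out = score_doc_sections_alt existing_doc symbols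
instance (existing_doc : String) (symbols : List String) (out : List (String × String)) : Decidable (Spec_score_doc_sections existing_doc symbols out) := by unfold Spec_score_doc_sections; infer_instance

-- ===== CLAIM (what is proved, stated in full; the proofs are below) =====
def Claim_equal_score_doc_sections : Prop := ∀ (existing_doc : String) (symbols : List String), Dom_score_doc_sections existing_doc symbols → Spec_score_doc_sections existing_doc symbols (score_doc_sections existing_doc symbols)

-- ===== LEMMAS AND PROOFS =====

-- emit of one (possibly empty-heading) section
def pvEmit (h : String) (buf : List String) : List (String × String) :=
  if h == "" then [] else [(h, PySem.Str.strip (PySem.Str.join "\n" buf))]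

lemma pvFlush_eq_emit (secs : List (String × String)) (h : String) (buf : List String) :
    pvFlush secs h buf = secs ++ pvEmit h buf := by
  unfold pvFlush pvEmit; split <;> simp

-- B's parser as a foldr (what foldl over the reversed lines computes)
def pvParseR (lines : List String) : List (String × String) × List String :=
  lines.foldr (fun line st => pvStepB st line) ([], [])

lemma pvParseR_eq_foldl_reverse (lines : List String) :
    lines.reverse.foldl pvStepB ([], []) = pvParseR lines := by
  simp [pvParseR, List.foldl_reverse (l := lines) (f := pvStepB) (b := ([], []))]

-- A's accumulator loop, flushed, equals B's back-to-front parse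
lemma pvParse_invariant (lines : List String) :
    ∀ (secs : List (String × String)) (h : String) (buf : List String),
      (let st := lines.foldl pvStepA (secs, h, buf); pvFlush st.1 st.2.1 st.2.2)
        = secs ++ pvEmit h (buf ++ (pvParseR lines).2.reverse) ++ (pvParseR lines).1.reverse := by
  induction lines with
  | nil => intro secs h buf; simp [pvParseR, pvFlush_eq_emit]
  | cons l ls ih =>
    intro secs h buf
    by_cases hsw : PySem.Str.startswith l "## " = true
    · simp only [List.foldl_cons, pvStepA, hsw, if_pos]
      rw [ih]
      simp only [pvParseR, List.foldr_cons, pvStepB, hsw, if_pos]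
      rw [pvFlush_eq_emit]
      by_cases hh : PySem.Str.strip (pvLstripHashSpace l) == ""
      · simp [pvEmit, hh, List.append_assoc]
      · simp only [pvEmit, hh, if_neg, Bool.not_eq_true]
        simp [List.append_assoc]
    · simp only [List.foldl_cons, pvStepA, hsw, if_neg, Bool.not_eq_true]
      rw [ih]
      simp only [pvParseR, List.foldr_cons, pvStepB, hsw, if_neg, Bool.not_eq_true]
      simp [List.append_assoc]

-- the two parsers agree
lemma pvSections_eq (lines : List String) :
    (let st := lines.foldl pvStepA ([], "", []); pvFlush st.1 st.2.1 st.2.2)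
      = (lines.reverse.foldl pvStepB ([], [])).1.reverse := by
  rw [pvParseR_eq_foldl_reverse, pvParse_invariant]
  simp [pvEmit]

-- insertion with the comparison rewritten on a prefix and constantly true on the suffix
lemma pvInsertBy_classes_left {α : Type} (b b' : α → α → Bool) (x : α) (P N : List α)
    (hP : ∀ y ∈ P, b x y = b' x y) (hN : ∀ y ∈ N, b x y = true) :
    PySem.List.insertBy b x (P ++ N) = PySem.List.insertBy b' x P ++ N := by
  induction P with
  | nil =>
    cases N with
    | nil => simp [PySem.List.insertBy]
    | cons n N' => simp [PySem.List.insertBy, hN n (by simp)]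
  | cons a P' ih =>
    have ha := hP a (by simp)
    by_cases hb : b' x a = true
    · simp [PySem.List.insertBy, ha, hb]
    · have hb' : b x a = false := by rw [ha]; simpa using hb
      simp only [List.cons_append, PySem.List.insertBy, hb', Bool.false_eq_true,
        hb, ite_false]
      simp [ih (fun y hy => hP y (by simp [hy]))]

-- insertion skipping a constantly-false prefix, comparison rewritten on the suffix
lemma pvInsertBy_classes_right {α : Type} (b b' : α → α → Bool) (x : α) (P N : List α)
    (hP : ∀ y ∈ P, b x y = false) (hN : ∀ y ∈ N, b x y = b' x y) :
    PySem.List.insertBy b x (P ++ N) = P ++ PySem.List.insertBy b' x N := by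
  induction P with
  | nil =>
    simp only [List.nil_append]
    induction N with
    | nil => simp [PySem.List.insertBy]
    | cons n N' ihn =>
      have hn := hN n (by simp)
      by_cases hb : b' x n = true
      · simp [PySem.List.insertBy, hn, hb]
      · have hb' : b x n = false := by rw [hn]; simpa using hb
        simp [PySem.List.insertBy, hb', hb, ihn (fun y hy => hN y (by simp [hy]))]
  | cons a P' ih =>
    have ha := hP a (by simp)
    simp [PySem.List.insertBy, ha, ih (fun y hy => hP y (by simp [hy]))]

-- names for the two comparison functions
def pvBA {α : Type} (k2 : α → Int) : α → α → Bool := fun a b => decide (k2 a < k2 b)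

def pvB2 {α : Type} (q : α → Bool) (k2 : α → Int) : α → α → Bool := fun a b =>
  decide ((!q a) < (!q b)) || (!decide ((!q b) < (!q a)) && decide (k2 a < k2 b))

-- filtering an insertion into a key-sorted list
lemma pvFilter_insertBy {α : Type} (k2 : α → Int) (r : α → Bool) (x : α) (L : List α)
    (hL : L.Pairwise (fun a b => k2 a ≤ k2 b)) :
    List.filter r (PySem.List.insertBy (pvBA k2) x L)
      = if r x then PySem.List.insertBy (pvBA k2) x (L.filter r)
        else L.filter r := by
  induction L with
  | nil => by_cases hr : r x <;> simp [PySem.List.insertBy, List.filter, hr]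
  | cons y L' ih =>
    rcases List.pairwise_cons.mp hL with ⟨hy, hL'⟩
    by_cases hxy : k2 x < k2 y
    · -- x goes in front of y
      have hall : ∀ z ∈ L'.filter r, pvBA k2 x z = true := by
        intro z hz
        have hz' := List.of_mem_filter hz
        have := hy z (List.mem_of_mem_filter hz)
        simp only [pvBA, decide_eq_true_eq]; omega
      by_cases hr : r x
      · by_cases hry : r y
        · simp [PySem.List.insertBy, hxy, hr, hry, List.filter, pvBA]
        · have : PySem.List.insertBy (pvBA k2) x (L'.filter r)
              = [] ++ x :: L'.filter r := by
            simpa using pvInsertBy_classes_left (pvBA k2)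
              (pvBA k2) x [] (L'.filter r) (by simp) hall
          simp [PySem.List.insertBy, hxy, hr, hry, List.filter, this, pvBA]
      · by_cases hry : r y <;>
          simp [PySem.List.insertBy, hxy, hr, hry, List.filter, pvBA]
    · -- x goes after y
      have hxy' : decide (k2 x < k2 y) = false := by simpa using hxy
      by_cases hr : r x
      · by_cases hry : r y
        · simp [PySem.List.insertBy, hxy', hr, hry, List.filter, ih hL', pvBA]
        · simp [PySem.List.insertBy, hxy', hr, hry, List.filter, ih hL', pvBA]
      · by_cases hry : r y <;>
          simp [PySem.List.insertBy, hxy', hr, hry, List.filter, ih hL', pvBA]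

lemma pvSorted_append_singleton {α : Type} (xs : List α) (x : α) (k2 : α → Int) :
    PySem.List.sorted (xs ++ [x]) k2 false
      = PySem.List.insertBy (pvBA k2) x (PySem.List.sorted xs k2 false) := by
  rw [PySem.List.sorted_eq_foldl_insertBy, PySem.List.sorted_eq_foldl_insertBy,
    List.foldl_append]
  rfl

lemma pvSorted2_append_singleton {α : Type} (xs : List α) (x : α) (q : α → Bool) (k2 : α → Int) :
    PySem.List.sorted2 (xs ++ [x]) (fun a => !q a) k2 false
      = PySem.List.insertBy (pvB2 q k2) x (PySem.List.sorted2 xs (fun a => !q a) k2 false) := by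
  show List.foldl _ [] (xs ++ [x]) = _
  rw [List.foldl_append]
  rfl

-- one stable sort on (¬q, k2) = stable sort on k2 then stable partition by q
lemma pvSorted2_eq_partition {α : Type} (q : α → Bool) (k2 : α → Int) (xs : List α) :
    PySem.List.sorted2 xs (fun a => !q a) k2 false
      = (PySem.List.sorted xs k2 false).filter q
          ++ (PySem.List.sorted xs k2 false).filter (fun a => !q a) := by
  induction xs using List.reverseRecOn with
  | nil => rfl
  | append_singleton xs x ih =>
    have hpw : (PySem.List.sorted xs k2 false).Pairwise (fun a b => k2 a ≤ k2 b) :=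
      PySem.List.sorted_pairwise xs k2
    rw [pvSorted2_append_singleton, pvSorted_append_singleton, ih]
    by_cases hq : q x
    · have h1 : ∀ y ∈ (PySem.List.sorted xs k2 false).filter q,
          pvB2 q k2 x y = pvBA k2 x y := by
        intro y hy
        have := List.of_mem_filter hy
        simp [pvB2, pvBA, hq, this]
      have h2 : ∀ y ∈ (PySem.List.sorted xs k2 false).filter (fun a => !q a),
          pvB2 q k2 x y = true := by
        intro y hy
        have := List.of_mem_filter hy
        simp only [Bool.not_eq_true'] at this
        simp [pvB2, hq, this]
      rw [pvInsertBy_classes_left _ _ _ _ _ h1 h2]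
      rw [pvFilter_insertBy k2 q x _ hpw, pvFilter_insertBy k2 (fun a => !q a) x _ hpw]
      simp [hq]
    · have hq' : q x = false := by simpa using hq
      have h1 : ∀ y ∈ (PySem.List.sorted xs k2 false).filter q,
          pvB2 q k2 x y = false := by
        intro y hy
        have := List.of_mem_filter hy
        simp [pvB2, hq', this]
      have h2 : ∀ y ∈ (PySem.List.sorted xs k2 false).filter (fun a => !q a),
          pvB2 q k2 x y = pvBA k2 x y := by
        intro y hy
        have := List.of_mem_filter hy
        simp only [Bool.not_eq_true'] at this
        simp [pvB2, pvBA, hq', this]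
      rw [pvInsertBy_classes_right _ _ _ _ _ h1 h2]
      rw [pvFilter_insertBy k2 q x _ hpw, pvFilter_insertBy k2 (fun a => !q a) x _ hpw]
      simp [hq']

-- reverse=True with key is reverse=False with the negated key
lemma pvSorted_rev_eq_sorted_neg {α : Type} (xs : List α) (key : α → Int) :
    PySem.List.sorted xs key true = PySem.List.sorted xs (fun a => -key a) false := by
  show List.foldl _ [] xs = List.foldl _ [] xs
  have : (fun (a b : α) => decide (key b < key a)) = fun a b => decide (-key a < -key b) := by
    funext a b
    simp only [decide_eq_decide]
    omega
  rw [this]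
  simp

-- A's 0/1-sum score is B's filtered-length score
lemma pvScore_eq (l : List String) (p : String → Bool) :
    (List.map (fun t => if p t then (1 : Int) else 0) l).sum = ((l.filter p).length : Int) := by
  rw [PySem.List.sum_map_ite_one_zero, List.countP_eq_length_filter]

-- ===== VERDICT (by name: the statement is the Claim_ definition above) =====
theorem score_doc_sections_spec : Claim_equal_score_doc_sections := by
  intro existing_doc symbols _
  unfold Spec_score_doc_sections score_doc_sections score_doc_sections_alt
  by_cases hg : (existing_doc == "" || symbols == []) = true
  · simp only [hg]; rfl
  · simp only [Bool.not_eq_true] at hg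
    simp only [hg, Bool.false_eq_true, if_false]
    rw [pvSections_eq (PySem.Str.splitlines existing_doc)]
    have hscore : (fun (s : String × String) =>
        (List.map (fun tok => if PySem.Str.isIn tok
            (PySem.Str.lower (PySem.Str.join " " [s.1, s.2])) then (1 : Int) else 0)
          (PySem.Set.ofList (symbols.map (fun s => PySem.Str.lower s)))).sum)
        = (fun (s : String × String) =>
            ((List.filter (fun tok => PySem.Str.isIn tok
                (PySem.Str.lower (PySem.Str.join " " [s.1, s.2])))
              (PySem.Set.ofList (symbols.map (fun s => PySem.Str.lower s)))).length : Int)) := by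
      funext s
      exact pvScore_eq _ _
    rw [pvSorted_rev_eq_sorted_neg]
    rw [show (fun (a : String × String) =>
          -(List.map (fun tok => if PySem.Str.isIn tok
              (PySem.Str.lower (PySem.Str.join " " [a.1, a.2])) then (1 : Int) else 0)
            (PySem.Set.ofList (symbols.map (fun s => PySem.Str.lower s)))).sum)
        = (fun (a : String × String) =>
          -((List.filter (fun tok => PySem.Str.isIn tok
              (PySem.Str.lower (PySem.Str.join " " [a.1, a.2])))
            (PySem.Set.ofList (symbols.map (fun s => PySem.Str.lower s)))).length : Int)) from by
      funext a; rw [pvScore_eq]]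
    exact (pvSorted2_eq_partition
      (fun s : String × String => PySem.Str.lower s.1 == "overview") _ _).symm
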